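-- pv_equiv track=rewrite | github.com/wown387/BOJ-and-Programmers | baekjoon/triangle.py | solution
-- ===== SOURCE A (Python) =====
-- def solution(w,h):
--     if w == h:
--         answer = w * h - h
--         return answer
--     if w == 1 or h == 1:
--         return 0
--
--     # w, h의 공약수를 저장할 리스트 생성
--     temp_w = []
--     temp_h = []
--
--     # w와 h는 1억이하 자연수이다.
--     if w <= 10000**10000 and h <= 10000**10000:
--
--         # for문을 돌며 공약수를 저장합니다.
--         for i in range(w, 0, -1):
--             if w%(i)==0: temp_w.append(i)
--         for j in range(h, 0, -1):
--             if h%(j)==0: temp_h.append(j)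
--     else: return 0
--
--     # temp_w와 temp_h의 최대공약수가 1일 때 (w * h) - (w + h - 1)을 리턴한다.
--     # temp_w와 temp_h의 최대공약수가 1초과일 때 (w * h) - (w + h - 최대공약수))을 리턴한다
--     # 교집합을 구하려면 type이 set이어야 한다.
--     temp_w_set = set(temp_w)
--     temp_h_set = set(temp_h)
--     if max(temp_w_set&temp_h_set) == 1: return (w * h) - (w + h - 1)
--     elif max(temp_w_set&temp_h_set) > 1: return (w * h) - (w + h - max(temp_w_set&temp_h_set))
-- ===== SOURCE B (Python) =====
-- def solution(w, h):
--     # closed form: squares crossed by the diagonal = w + h - gcd(w, h)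
--     a, b = w, h
--     while b:
--         a, b = b, a % b
--     return w * h - (w + h - a)
-- ===== Notes on version B (the rewrite author's own statement) =====
-- stated objective: faster
-- what changed: B replaces A's divisor-enumeration loops (range(w,0,-1), range(h,0,-1)) plus set intersection and max with a Euclidean gcd loop and the closed formula w*h - (w+h-gcd).
-- outside the precondition, e.g. on solution(1, -3): A returns 0, B returns -2; on solution(0, 5): A raises ValueError, B returns 0
import Mathlib
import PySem

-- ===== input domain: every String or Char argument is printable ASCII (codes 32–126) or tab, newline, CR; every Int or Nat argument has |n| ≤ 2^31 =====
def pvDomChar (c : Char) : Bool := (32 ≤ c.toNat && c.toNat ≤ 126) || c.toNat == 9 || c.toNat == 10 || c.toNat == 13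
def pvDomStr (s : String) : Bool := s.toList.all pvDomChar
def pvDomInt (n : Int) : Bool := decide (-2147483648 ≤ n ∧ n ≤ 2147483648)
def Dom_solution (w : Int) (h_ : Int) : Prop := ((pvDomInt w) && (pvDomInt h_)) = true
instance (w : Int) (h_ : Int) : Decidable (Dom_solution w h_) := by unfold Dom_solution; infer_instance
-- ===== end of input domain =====

-- B replaces A's O(w+h) divisor-enumeration + set-intersection computation of the gcd by a
-- Euclidean gcd loop and the closed formula w*h - (w+h-gcd)  (objective: faster, asymptotic).


-- ===== PORT A =====
-- literal port of A: the two divisor-collecting countdown loops, the two sets, their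
-- intersection, and the max-based final branches.  Python's max(...) of an empty set raises
-- ValueError: that case (`none`) returns a junk 0 here and is excluded by Pre_solution;
-- likewise the dead `else: return 0` / fall-through-None branches (unreachable on Dom/Pre_).
def solution (w : Int) (h_ : Int) : Int :=
  if w = h_ then w * h_ - h_
  else if w = 1 ∨ h_ = 1 then 0
  else if w ≤ 10000 ^ (10000 : Nat) ∧ h_ ≤ 10000 ^ (10000 : Nat) then
    let temp_w := (PySem.List.pyRange w 0 (-1)).foldl
      (fun acc i => if PySem.Int.mod w i == 0 then acc ++ [i] else acc) []
    let temp_h := (PySem.List.pyRange h_ 0 (-1)).foldl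
      (fun acc j => if PySem.Int.mod h_ j == 0 then acc ++ [j] else acc) []
    let temp_w_set := PySem.Set.ofList temp_w
    let temp_h_set := PySem.Set.ofList temp_h
    match PySem.List.max? (PySem.Set.inter temp_w_set temp_h_set) (fun x => x) with
    | some m => if m = 1 then w * h_ - (w + h_ - 1)
                else if m > 1 then w * h_ - (w + h_ - m)
                else 0
    | none => 0
  else 0

-- ===== PORT B =====
-- B's while-loop `while b: a, b = b, a % b`; the fuel argument |b|+1 only makes the same
-- computation total (|b| strictly decreases each iteration).
def euclidFuel : Nat → Int → Int → Int
  | 0, a, _ => a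
  | fuel + 1, a, b => if b = 0 then a else euclidFuel fuel b (PySem.Int.mod a b)

def solution_alt (w : Int) (h_ : Int) : Int :=
  w * h_ - (w + h_ - euclidFuel (h_.natAbs + 1) w h_)

-- ===== PRECONDITION & SPEC =====
-- Pre_ excludes exactly (a) the non-positive inputs on which A raises ValueError (max of an
-- empty intersection), and (b) the corner w = 1 with h < 0, where A's 0 is an accident of
-- branch order outside the problem's natural-number domain while B's gcd loop gives another
-- value (e.g. A (1,-3) = 0, B (1,-3) = -2).
def Pre_solution (w : Int) (h_ : Int) : Prop :=
  (1 ≤ w ∧ 1 ≤ h_) ∨ w = h_ ∨ h_ = 1 ∨ (w = 1 ∧ 0 ≤ h_)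
instance (w : Int) (h_ : Int) : Decidable (Pre_solution w h_) := by unfold Pre_solution; infer_instance
def pvWitness_solution : Int × Int := (4, 6)

def Spec_solution (w : Int) (h_ : Int) (out : Int) : Prop := out = solution_alt w h_
instance (w : Int) (h_ : Int) (out : Int) : Decidable (Spec_solution w h_ out) := by unfold Spec_solution; infer_instance

-- ===== CLAIM (what is proved, stated in full; the proofs are below) =====
def Claim_equal_solution : Prop := ∀ (w : Int) (h_ : Int), Dom_solution w h_ → Pre_solution w h_ → Spec_solution w h_ (solution w h_)

-- ===== LEMMAS AND PROOFS =====

lemma euclidFuel_zero_right (fuel : Nat) (a : Int) (hf : 0 < fuel) :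
    euclidFuel fuel a 0 = a := by
  cases fuel with
  | zero => omega
  | succ f => simp [euclidFuel]

-- the loop computes a greatest common divisor (in the divisibility order), and it is positive
lemma euclidFuel_spec (fuel : Nat) (a b : Int) (ha : 0 < a) (hb : 0 ≤ b)
    (hlt : b.natAbs < fuel) :
    0 < euclidFuel fuel a b ∧ euclidFuel fuel a b ∣ a ∧ euclidFuel fuel a b ∣ b ∧
      ∀ c : Int, c ∣ a → c ∣ b → c ∣ euclidFuel fuel a b := by
  induction fuel generalizing a b with
  | zero => omega
  | succ f ih =>
    by_cases hb0 : b = 0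
    · subst hb0
      have h0 : euclidFuel (f + 1) a 0 = a := by simp [euclidFuel]
      rw [h0]
      exact ⟨ha, dvd_rfl, dvd_zero a, fun c hc _ => hc⟩
    · have hbpos : 0 < b := lt_of_le_of_ne hb (Ne.symm hb0)
      have hmod : PySem.Int.mod a b = a % b := PySem.Int.mod_eq_emod_of_pos hbpos
      have hr0 : 0 ≤ a % b := Int.emod_nonneg a hb0
      have hrlt : a % b < b := Int.emod_lt_of_pos a hbpos
      have hstep : euclidFuel (f + 1) a b = euclidFuel f b (a % b) := by
        simp [euclidFuel, hb0, hmod]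
      rw [hstep]
      have hlt' : (a % b).natAbs < f := by omega
      obtain ⟨hpos, hdb, hdr, hgr⟩ := ih b (a % b) hbpos hr0 hlt'
      have hae : a = b * (a / b) + a % b := by
        have := Int.emod_def a b; omega
      refine ⟨hpos, ?_, hdb, ?_⟩
      · have h2 : euclidFuel f b (a % b) ∣ b * (a / b) + a % b :=
          dvd_add (Dvd.dvd.mul_right hdb _) hdr
        rwa [show b * (a / b) + a % b = a by omega] at h2
      · intro c hca hcb
        refine hgr c hcb ?_
        have h3 : c ∣ a - b * (a / b) := dvd_sub hca (Dvd.dvd.mul_right hcb _)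
        rwa [show a - b * (a / b) = a % b by omega] at h3

lemma euclid_self (w : Int) : euclidFuel (w.natAbs + 1) w w = w := by
  by_cases hw : w = 0
  · subst hw; simp [euclidFuel]
  · have hmod : PySem.Int.mod w w = 0 := (PySem.Int.mod_eq_zero_iff_dvd w w).mpr dvd_rfl
    have h1 : euclidFuel (w.natAbs + 1) w w = euclidFuel w.natAbs w 0 := by
      simp [euclidFuel, hw, hmod]
    rw [h1, euclidFuel_zero_right _ _ (by omega)]

lemma euclid_one_right (w : Int) : euclidFuel ((1:Int).natAbs + 1) w 1 = 1 := by
  have hmod : PySem.Int.mod w 1 = 0 := (PySem.Int.mod_eq_zero_iff_dvd w 1).mpr (one_dvd w)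
  simp [euclidFuel]

lemma nodup_pyRange_countdown (a b : Int) : (PySem.List.pyRange a b (-1)).Nodup := by
  rw [PySem.List.pyRange_neg_one_eq_reverse]
  exact List.nodup_reverse.mpr (PySem.List.nodup_pyRange_one _ _)

-- membership in A's divisor list, for n in place of w/h
lemma mem_divlist (n x : Int) :
    x ∈ (PySem.List.pyRange n 0 (-1)).foldl
        (fun acc i => if PySem.Int.mod n i == 0 then acc ++ [i] else acc) [] ↔
      (0 < x ∧ x ≤ n ∧ x ∣ n) := by
  rw [show (fun (acc : List Int) (i : Int) => if PySem.Int.mod n i == 0 then acc ++ [i] else acc)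
        = fun acc i => if (fun j => PySem.Int.mod n j == 0) i = true then acc ++ [(fun j => j) i] else acc
      from rfl]
  rw [PySem.List.foldl_append_if]
  simp only [List.nil_append, List.map_id', List.mem_filter, PySem.List.mem_pyRange_neg_one,
    beq_iff_eq, PySem.Int.mod_eq_zero_iff_dvd]
  tauto

lemma divlist_nodup (n : Int) :
    ((PySem.List.pyRange n 0 (-1)).foldl
        (fun acc i => if PySem.Int.mod n i == 0 then acc ++ [i] else acc) []).Nodup := by
  rw [show (fun (acc : List Int) (i : Int) => if PySem.Int.mod n i == 0 then acc ++ [i] else acc)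
        = fun acc i => if (fun j => PySem.Int.mod n j == 0) i = true then acc ++ [(fun j => j) i] else acc
      from rfl]
  rw [PySem.List.foldl_append_if]
  simp only [List.nil_append, List.map_id']
  exact (nodup_pyRange_countdown n 0).filter _

-- ===== VERDICT (by name: the statement is the Claim_ definition above) =====
set_option maxRecDepth 8192 in
theorem solution_spec : Claim_equal_solution := by
  intro w h_ hdom hpre
  unfold Spec_solution solution solution_alt
  by_cases hwh : w = h_
  · subst hwh
    rw [if_pos rfl, euclid_self]; ring
  · rw [if_neg hwh]
    by_cases hh1 : h_ = 1
    · subst hh1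
      rw [if_pos (Or.inr rfl), euclid_one_right]; ring
    · by_cases hw1 : w = 1
      · subst hw1
        rw [if_pos (Or.inl rfl)]
        have hh0 : 0 ≤ h_ := by
          unfold Pre_solution at hpre; omega
        by_cases hhz : h_ = 0
        · subst hhz; simp [euclidFuel]
        · have hhpos : 0 < h_ := lt_of_le_of_ne hh0 (Ne.symm hhz)
          obtain ⟨hpos, hda, _, _⟩ := euclidFuel_spec (h_.natAbs + 1) 1 h_ one_pos hh0 (by omega)
          have he1 : euclidFuel (h_.natAbs + 1) 1 h_ = 1 := by
            rcases Int.isUnit_iff.mp (isUnit_of_dvd_one hda) with h | h <;> omega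
          rw [he1]; ring
      · -- main case: from Pre_, 2 ≤ w and 2 ≤ h_
        have hw2 : 2 ≤ w := by unfold Pre_solution at hpre; omega
        have hh2 : 2 ≤ h_ := by unfold Pre_solution at hpre; omega
        have hbig : (2147483648 : Int) ≤ 10000 ^ (10000 : Nat) := by
          have h3 : (10000 : Int) ^ (3 : Nat) ≤ 10000 ^ (10000 : Nat) :=
            pow_le_pow_right₀ (by omega) (by omega)
          have h4 : (2147483648 : Int) ≤ 10000 ^ (3 : Nat) := by norm_num
          omega
        have hdw : w ≤ 10000 ^ (10000 : Nat) := by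
          unfold Dom_solution pvDomInt at hdom
          simp only [Bool.and_eq_true, decide_eq_true_eq] at hdom
          omega
        have hdh : h_ ≤ 10000 ^ (10000 : Nat) := by
          unfold Dom_solution pvDomInt at hdom
          simp only [Bool.and_eq_true, decide_eq_true_eq] at hdom
          omega
        rw [if_neg (show ¬(w = 1 ∨ h_ = 1) from fun hc => hc.elim hw1 hh1)]
        rw [if_pos ⟨hdw, hdh⟩]
        -- the element set of the intersection
        set tw := (PySem.List.pyRange w 0 (-1)).foldl
          (fun acc i => if PySem.Int.mod w i == 0 then acc ++ [i] else acc) [] with htw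
        set th := (PySem.List.pyRange h_ 0 (-1)).foldl
          (fun acc j => if PySem.Int.mod h_ j == 0 then acc ++ [j] else acc) [] with hth
        have hsw : PySem.Set.ofList tw = tw := PySem.Set.ofList_eq_self_of_nodup tw (divlist_nodup w)
        have hsh : PySem.Set.ofList th = th := PySem.Set.ofList_eq_self_of_nodup th (divlist_nodup h_)
        have hmemL : ∀ x : Int, x ∈ PySem.Set.inter (PySem.Set.ofList tw) (PySem.Set.ofList th)
            ↔ ((0 < x ∧ x ≤ w ∧ x ∣ w) ∧ (0 < x ∧ x ≤ h_ ∧ x ∣ h_)) := by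
          intro x
          rw [PySem.Set.mem_inter, hsw, hsh, htw, hth, mem_divlist, mem_divlist]
        -- B's loop value e is a positive greatest common divisor
        obtain ⟨hepos, hew, heh, hegr⟩ :=
          euclidFuel_spec (h_.natAbs + 1) w h_ (by omega) (by omega) (by omega)
        set e := euclidFuel (h_.natAbs + 1) w h_ with he
        have heL : e ∈ PySem.Set.inter (PySem.Set.ofList tw) (PySem.Set.ofList th) := by
          rw [hmemL]
          exact ⟨⟨hepos, Int.le_of_dvd (by omega) hew, hew⟩,
                 ⟨hepos, Int.le_of_dvd (by omega) heh, heh⟩⟩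
        cases hmax : PySem.List.max? (PySem.Set.inter (PySem.Set.ofList tw) (PySem.Set.ofList th)) (fun x => x) with
        | none =>
          rw [PySem.List.max?_eq_none_iff] at hmax
          rw [hmax] at heL
          simp at heL
        | some m =>
          simp only [hmax]
          have hmL := PySem.List.max?_mem hmax
          rw [hmemL] at hmL
          obtain ⟨⟨hmpos, _, hmw⟩, ⟨_, _, hmh⟩⟩ := hmL
          have hme : m ∣ e := hegr m hmw hmh
          have h1 : m ≤ e := Int.le_of_dvd hepos hme
          have h2 : e ≤ m := PySem.List.max?_isMax hmax e heL
          have hem : m = e := le_antisymm h1 h2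
          rw [← hem]
          by_cases hm1 : m = 1
          · rw [if_pos hm1, hm1]
          · rw [if_neg hm1, if_pos (by omega : m > 1)]
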